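-- pv_equiv track=rewrite | github.com/Sayantan-coder/Edabith-Hard-level | First_before_second_letter.py | first_before_second
-- ===== SOURCE A (Python) =====
-- def first_before_second(text: str, first: str, second: str) -> bool:
--     first_last = -1
--     second_first = len(text)
--     for index in range(len(text)):
--         if text[index] == first:
--             first_last = index
--         elif text[index] == second:
--             if index < second_first:
--                 second_first = index
--     if first_last < second_first:
--         return True
--     else:
--         return False
-- ===== SOURCE B (Python) =====
-- def first_before_second(text: str, first: str, second: str) -> bool:
--     seen_second = False
--     for ch in text:
--         if ch == first:
--             if seen_second:
--                 return False
--         elif ch == second: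
--             seen_second = True
--     return True
-- ===== Notes on version B (the rewrite author's own statement) =====
-- stated objective: simpler
-- what changed: Replaces A's index bookkeeping (tracking last index of first and first index of second via range(len(text)) and comparing them) by a boolean state machine iterating directly over the characters: remember whether second was seen and return False immediately when first appears after it.
import Mathlib
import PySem

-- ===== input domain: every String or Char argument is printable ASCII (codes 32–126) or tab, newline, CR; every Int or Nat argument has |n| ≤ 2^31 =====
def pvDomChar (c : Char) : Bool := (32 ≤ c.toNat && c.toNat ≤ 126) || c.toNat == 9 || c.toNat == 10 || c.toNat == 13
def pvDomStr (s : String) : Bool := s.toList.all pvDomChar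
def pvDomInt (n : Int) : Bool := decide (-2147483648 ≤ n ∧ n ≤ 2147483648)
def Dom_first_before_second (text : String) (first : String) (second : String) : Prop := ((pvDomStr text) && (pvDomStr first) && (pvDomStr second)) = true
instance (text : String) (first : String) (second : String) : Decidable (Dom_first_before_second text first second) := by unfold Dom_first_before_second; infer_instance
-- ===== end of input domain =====

-- B replaces A's index bookkeeping (last index of first vs first index of second) by a
-- boolean state machine over the characters with early exit; same cost, plainer logic.

-- ===== PORT A =====
-- literal port of A: one fold over range(len(text)) carrying (first_last, second_first)
def first_before_second (text : String) (first : String) (second : String) : Bool :=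
  let cs := text.toList
  let st := (PySem.List.pyRange 0 (PySem.Str.len text) 1).foldl
    (fun (st : Int × Int) index =>
      if [PySem.List.pyGetD cs index ' '] = first.toList then (index, st.2)
      else if [PySem.List.pyGetD cs index ' '] = second.toList then
        (if index < st.2 then (st.1, index) else st)
      else st)
    (-1, PySem.Str.len text)
  if st.1 < st.2 then true else false

-- ===== PORT B =====
-- port of B: recursion over the characters carrying the `seen_second` flag; the
-- `return False` early exit becomes returning `false` without recursing.
def pvAltLoop (first second : String) : List Char → Bool → Bool
  | [], _ => true
  | c :: tl, seen =>
    if [c] = first.toList then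
      (if seen then false else pvAltLoop first second tl seen)
    else if [c] = second.toList then pvAltLoop first second tl true
    else pvAltLoop first second tl seen

def first_before_second_alt (text : String) (first : String) (second : String) : Bool :=
  pvAltLoop first second text.toList false

-- ===== PRECONDITION & SPEC =====
def Spec_first_before_second (text : String) (first : String) (second : String) (out : Bool) : Prop := out = first_before_second_alt text first second
instance (text : String) (first : String) (second : String) (out : Bool) : Decidable (Spec_first_before_second text first second out) := by unfold Spec_first_before_second; infer_instance

-- ===== CLAIM =====
def Claim_equal_first_before_second : Prop := ∀ (text : String) (first : String) (second : String), Dom_first_before_second text first second → Spec_first_before_second text first second (first_before_second text first second)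

-- ===== LEMMAS AND PROOFS =====

-- A's step function over enumerated pairs.
def pvStepA (first second : String) (st : Int × Int) (p : Int × Char) : Int × Int :=
  if [p.2] = first.toList then (p.1, st.2)
  else if [p.2] = second.toList then (if p.1 < st.2 then (st.1, p.1) else st)
  else st

-- Once second_first ≤ first_last and all remaining indices are ≥ second_first,
-- the final state still has second_first ≤ first_last (the result is dead: False).
theorem pv_dead (first second : String) :
    ∀ (ps : List (Int × Char)) (fl sf : Int), sf ≤ fl → (∀ p ∈ ps, sf ≤ p.1) →
      (ps.foldl (pvStepA first second) (fl, sf)).2 ≤ (ps.foldl (pvStepA first second) (fl, sf)).1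
  | [], fl, sf, h, _ => h
  | p :: tl, fl, sf, h, hidx => by
    have hs : sf ≤ p.1 := hidx p List.mem_cons_self
    have htl : ∀ q ∈ tl, sf ≤ q.1 := fun q hq => hidx q (List.mem_cons_of_mem _ hq)
    by_cases hP : [p.2] = first.toList
    · simp only [List.foldl_cons, pvStepA, if_pos hP]
      exact pv_dead first second tl p.1 sf hs htl
    · by_cases hQ : [p.2] = second.toList
      · have hnl : ¬ p.1 < sf := not_lt.mpr hs
        simp only [List.foldl_cons, pvStepA, if_neg hP, if_pos hQ, if_neg hnl]
        exact pv_dead first second tl fl sf h htl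
      · simp only [List.foldl_cons, pvStepA, if_neg hP, if_neg hQ]
        exact pv_dead first second tl fl sf h htl

-- seen = true phase: second_first is fixed at sf ≤ all remaining indices and fl < sf;
-- A's final comparison equals B's loop with seen = true.
theorem pv_seen (first second : String) :
    ∀ (ps : List (Int × Char)) (fl sf : Int), fl < sf → (∀ p ∈ ps, sf ≤ p.1) →
      (decide ((ps.foldl (pvStepA first second) (fl, sf)).1 < (ps.foldl (pvStepA first second) (fl, sf)).2))
        = pvAltLoop first second (ps.map (·.2)) true
  | [], fl, sf, h, _ => by simp [pvAltLoop, h]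
  | p :: tl, fl, sf, h, hidx => by
    have hs : sf ≤ p.1 := hidx p List.mem_cons_self
    have htl : ∀ q ∈ tl, sf ≤ q.1 := fun q hq => hidx q (List.mem_cons_of_mem _ hq)
    by_cases hP : [p.2] = first.toList
    · -- first occurs after second: A's state is dead, B returns False immediately
      have hd := pv_dead first second tl p.1 sf hs htl
      have hr : pvAltLoop first second (p.2 :: tl.map (·.2)) true = false := by
        simp [pvAltLoop, if_pos hP]
      simp only [List.map_cons, hr, List.foldl_cons, pvStepA, if_pos hP]
      exact decide_eq_false (by omega)
    · by_cases hQ : [p.2] = second.toList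
      · have hnl : ¬ p.1 < sf := not_lt.mpr hs
        have hr : pvAltLoop first second (p.2 :: tl.map (·.2)) true
            = pvAltLoop first second (tl.map (·.2)) true := by
          simp [pvAltLoop, if_neg hP, if_pos hQ]
        simp only [List.map_cons, hr, List.foldl_cons, pvStepA, if_neg hP, if_pos hQ, if_neg hnl]
        exact pv_seen first second tl fl sf h htl
      · have hr : pvAltLoop first second (p.2 :: tl.map (·.2)) true
            = pvAltLoop first second (tl.map (·.2)) true := by
          simp [pvAltLoop, if_neg hP, if_neg hQ]
        simp only [List.map_cons, hr, List.foldl_cons, pvStepA, if_neg hP, if_neg hQ]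
        exact pv_seen first second tl fl sf h htl

-- seen = false phase: sf is the untouched sentinel above all remaining indices.
theorem pv_unseen (first second : String) :
    ∀ (ps : List (Int × Char)) (fl sf : Int), fl < sf →
      (∀ p ∈ ps, fl < p.1 ∧ p.1 < sf) → ps.Pairwise (fun p q => p.1 < q.1) →
      (decide ((ps.foldl (pvStepA first second) (fl, sf)).1 < (ps.foldl (pvStepA first second) (fl, sf)).2))
        = pvAltLoop first second (ps.map (·.2)) false
  | [], fl, sf, h, _, _ => by simp [pvAltLoop, h]
  | p :: tl, fl, sf, h, hidx, hpw => by
    have hp := hidx p List.mem_cons_self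
    have htl : ∀ q ∈ tl, fl < q.1 ∧ q.1 < sf := fun q hq => hidx q (List.mem_cons_of_mem _ hq)
    have hpw' : tl.Pairwise (fun p q => p.1 < q.1) := hpw.of_cons
    have hgt : ∀ q ∈ tl, p.1 < q.1 := fun q hq => (List.pairwise_cons.mp hpw).1 q hq
    by_cases hP : [p.2] = first.toList
    · have hr : pvAltLoop first second (p.2 :: tl.map (·.2)) false
          = pvAltLoop first second (tl.map (·.2)) false := by
        simp [pvAltLoop, if_pos hP]
      simp only [List.map_cons, hr, List.foldl_cons, pvStepA, if_pos hP]
      exact pv_unseen first second tl p.1 sf hp.2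
        (fun q hq => ⟨hgt q hq, (htl q hq).2⟩) hpw'
    · by_cases hQ : [p.2] = second.toList
      · have hr : pvAltLoop first second (p.2 :: tl.map (·.2)) false
            = pvAltLoop first second (tl.map (·.2)) true := by
          simp [pvAltLoop, if_neg hP, if_pos hQ]
        simp only [List.map_cons, hr, List.foldl_cons, pvStepA, if_neg hP, if_pos hQ, if_pos hp.2]
        exact pv_seen first second tl fl p.1 hp.1 (fun q hq => le_of_lt (hgt q hq))
      · have hr : pvAltLoop first second (p.2 :: tl.map (·.2)) false
            = pvAltLoop first second (tl.map (·.2)) false := by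
          simp [pvAltLoop, if_neg hP, if_neg hQ]
        simp only [List.map_cons, hr, List.foldl_cons, pvStepA, if_neg hP, if_neg hQ]
        exact pv_unseen first second tl fl sf h htl hpw'

-- ===== VERDICT =====
theorem first_before_second_spec : Claim_equal_first_before_second := by
  intro text first second _
  unfold Spec_first_before_second first_before_second first_before_second_alt
  have hmap :
      (PySem.List.pyRange 0 (PySem.Str.len text) 1).foldl
        (fun (st : Int × Int) index =>
          if [PySem.List.pyGetD text.toList index ' '] = first.toList then (index, st.2)
          else if [PySem.List.pyGetD text.toList index ' '] = second.toList then
            (if index < st.2 then (st.1, index) else st)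
          else st)
        (-1, PySem.Str.len text)
      = (PySem.List.enumerate text.toList).foldl (pvStepA first second)
          (-1, PySem.Str.len text) := by
    rw [PySem.List.enumerate_eq_map_pyRange text.toList ' ', List.foldl_map]
    simp [PySem.Str.len_eq, pvStepA]
  have hidx : ∀ p ∈ PySem.List.enumerate text.toList,
      (-1 : Int) < p.1 ∧ p.1 < PySem.Str.len text := by
    intro p hp
    rcases (PySem.List.mem_enumerate_iff _ _ _).mp hp with ⟨k, hk, rfl⟩
    simp only [PySem.Str.len_eq]
    omega
  have hpw : (PySem.List.enumerate text.toList).Pairwise (fun p q => p.1 < q.1) :=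
    PySem.List.pairwise_lt_enumerate text.toList 0
  have hlen : (-1 : Int) < PySem.Str.len text := by
    simp only [PySem.Str.len_eq]; omega
  have hsnd : (PySem.List.enumerate text.toList).map (·.2) = text.toList :=
    PySem.List.map_snd_enumerate text.toList 0
  have := pv_unseen first second (PySem.List.enumerate text.toList)
    (-1) (PySem.Str.len text) hlen hidx hpw
  rw [hsnd] at this
  simp only [hmap]
  rw [← this]
  split
  · rename_i h; exact (decide_eq_true h).symm
  · rename_i h; exact (decide_eq_false h).symm
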